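-- pv_equiv track=rewrite | github.com/edxz7/Pattern-Recognition-2d-collinear-points-finder-with-python-pyspark | pysparkSearchCollinearPoints.py | non_duplicates
-- ===== SOURCE A (Python) =====
-- def non_duplicates(x):
--     """
--     Use this function inside the get_cartesian() function to 'filter' out pairs with duplicate points
--     """
--     temp = sorted(x)
--     temp_p = None
--     for p in temp:
--         if p == temp_p:
--             return False
--         temp_p = p
--     return True
-- ===== SOURCE B (Python) =====
-- def non_duplicates(x):
--     """All points distinct iff deduplicating by a set preserves the length."""
--     return len(set(x)) == len(x)
-- ===== Notes on version B (the rewrite author's own statement) =====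
-- stated objective: idiomatic
-- what changed: Replaced the sort-then-compare-adjacent scan with the one-liner len(set(x)) == len(x): build the set of points once and compare cardinalities.
import Mathlib
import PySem

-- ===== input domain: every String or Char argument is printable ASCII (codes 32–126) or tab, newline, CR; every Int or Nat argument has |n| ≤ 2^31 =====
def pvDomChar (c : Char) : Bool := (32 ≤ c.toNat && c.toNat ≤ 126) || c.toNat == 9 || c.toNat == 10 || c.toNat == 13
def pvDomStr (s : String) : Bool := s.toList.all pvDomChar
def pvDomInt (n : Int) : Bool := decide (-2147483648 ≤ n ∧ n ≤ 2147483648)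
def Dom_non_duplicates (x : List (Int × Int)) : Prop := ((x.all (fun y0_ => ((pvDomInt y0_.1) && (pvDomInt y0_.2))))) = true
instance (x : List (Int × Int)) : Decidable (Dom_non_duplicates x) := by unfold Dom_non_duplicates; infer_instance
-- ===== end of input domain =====

-- B replaces the sort-then-scan-adjacent duplicate check with len(set(x)) == len(x) (idiomatic; same return value).


-- ===== PORT A =====
-- the 'for p in temp' loop carrying temp_p (initially None)
def pvLoopA : List (Int × Int) → Option (Int × Int) → Bool
  | [], _ => true
  | p :: rest, temp_p => if some p == temp_p then false else pvLoopA rest (some p)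

def non_duplicates (x : List (Int × Int)) : Bool :=
  pvLoopA (PySem.List.sorted2 x (fun p => p.1) (fun p => p.2) false) none

-- ===== PORT B =====
-- return len(set(x)) == len(x)
def non_duplicates_alt (x : List (Int × Int)) : Bool :=
  PySem.Set.len (PySem.Set.ofList x) == (x.length : Int)

-- ===== PRECONDITION & SPEC =====
def Spec_non_duplicates (x : List (Int × Int)) (out : Bool) : Prop := out = non_duplicates_alt x
instance (x : List (Int × Int)) (out : Bool) : Decidable (Spec_non_duplicates x out) := by unfold Spec_non_duplicates; infer_instance

-- ===== CLAIM (what is proved, stated in full; the proofs are below) =====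
def Claim_equal_non_duplicates : Prop := ∀ (x : List (Int × Int)), Dom_non_duplicates x → Spec_non_duplicates x (non_duplicates x)

-- ===== LEMMAS AND PROOFS =====

-- Python sorts pairs lexicographically: sorted2's comparison is '<' on Lex (Int × Int).
theorem pv_before_eq :
    (fun a b : Int × Int => decide (a.1 < b.1) || (!decide (b.1 < a.1) && decide (a.2 < b.2)))
      = fun a b : Int × Int => decide (toLex a < toLex b) := by
  funext a b
  rw [Bool.eq_iff_iff]; simp [Prod.Lex.lt_iff]; omega

theorem pv_foldl_insertBy_pairwise (xs : List (Int × Int)) :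
    ∀ acc : List (Int × Int),
      acc.Pairwise (fun a b => toLex a ≤ toLex b) →
      (xs.foldl (fun acc x =>
          PySem.List.insertBy (fun a b => decide (toLex a < toLex b)) x acc) acc).Pairwise
        (fun a b => toLex a ≤ toLex b) := by
  induction xs with
  | nil => intro acc h; simpa using h
  | cons y ys ih =>
      intro acc h
      exact ih _ (PySem.List.insertBy_pairwise_le (fun p => toLex p) y acc h)

theorem pv_sorted2_pairwise (x : List (Int × Int)) :
    (PySem.List.sorted2 x (fun p => p.1) (fun p => p.2) false).Pairwise
      (fun a b => toLex a ≤ toLex b) := by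
  have hrw : PySem.List.sorted2 x (fun p => p.1) (fun p => p.2) false
      = x.foldl (fun acc y =>
          PySem.List.insertBy (fun a b => decide (toLex a < toLex b)) y acc) [] := by
    simp only [PySem.List.sorted2, pv_before_eq, Bool.false_eq_true, if_false]
  rw [hrw]
  exact pv_foldl_insertBy_pairwise x [] (List.Pairwise.nil)

-- A's adjacent-equality scan, on a lexicographically ≤-sorted list, decides Nodup.
theorem pv_loopA_some (l : List (Int × Int)) :
    ∀ a : Int × Int,
      (a :: l).Pairwise (fun p q => toLex p ≤ toLex q) →
      (pvLoopA l (some a) = true ↔ (a :: l).Nodup) := by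
  induction l with
  | nil => intro a _; simp [pvLoopA]
  | cons p rest ih =>
      intro a h
      by_cases hpa : p = a
      · subst hpa
        simp [pvLoopA]
      · have hstep : pvLoopA (p :: rest) (some a) = pvLoopA rest (some p) := by
          simp [pvLoopA, hpa]
        have hp : (p :: rest).Pairwise (fun p q => toLex p ≤ toLex q) := h.tail
        have hiff := ih p hp
        rw [hstep, hiff]
        constructor
        · intro hnd
          refine List.nodup_cons.mpr ⟨?_, hnd⟩
          intro hmem
          rcases List.mem_cons.mp hmem with h1 | h2
          · exact hpa h1.symm
          · have hap : toLex a ≤ toLex p := (List.pairwise_cons.mp h).1 p (by simp)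
            have hpa' : toLex p ≤ toLex a := (List.pairwise_cons.mp hp).1 a h2
            have : toLex p = toLex a := le_antisymm hpa' hap
            exact hpa (toLex.injective this)
        · intro hnd
          exact (List.nodup_cons.mp hnd).2

theorem pv_A_eq_nodup (x : List (Int × Int)) :
    (non_duplicates x = true ↔ x.Nodup) := by
  unfold non_duplicates
  have hperm := PySem.List.sorted2_perm x (fun p => p.1) (fun p => p.2) false
  have hpw := pv_sorted2_pairwise x
  rw [← hperm.nodup_iff]
  cases hs : PySem.List.sorted2 x (fun p => p.1) (fun p => p.2) false with
  | nil => simp [pvLoopA]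
  | cons a t =>
      rw [hs] at hpw
      have : pvLoopA (a :: t) none = pvLoopA t (some a) := by
        simp [pvLoopA]
      rw [this]
      exact pv_loopA_some t a hpw

-- Building a set by folding add over xs adds at most one element per step …
theorem pv_foldl_add_len_le (xs : List (Int × Int)) :
    ∀ s : PySem.Set (Int × Int),
      (xs.foldl PySem.Set.add s).length ≤ s.length + xs.length := by
  induction xs with
  | nil => intro s; simp
  | cons p rest ih =>
      intro s
      have hstep : (PySem.Set.add s p).length ≤ s.length + 1 := by
        unfold PySem.Set.add
        split_ifs <;> simp
      calc ((p :: rest).foldl PySem.Set.add s).length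
          = (rest.foldl PySem.Set.add (PySem.Set.add s p)).length := by simp [List.foldl]
        _ ≤ (PySem.Set.add s p).length + rest.length := ih _
        _ ≤ s.length + (p :: rest).length := by simp; omega

-- … exactly one per step when xs has no duplicates and is disjoint from s …
theorem pv_foldl_add_len_eq (xs : List (Int × Int)) :
    ∀ s : PySem.Set (Int × Int), xs.Nodup → (∀ p ∈ xs, p ∉ s) →
      (xs.foldl PySem.Set.add s).length = s.length + xs.length := by
  induction xs with
  | nil => intro s _ _; simp
  | cons p rest ih =>
      intro s hnd hdis
      obtain ⟨hpn, hnd'⟩ := List.nodup_cons.mp hnd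
      have hps : p ∉ s := hdis p (by simp)
      have hc : s.contains p = false := by
        simpa using hps
      have hadd : PySem.Set.add s p = s ++ [p] := by
        simp only [PySem.Set.add, hc, Bool.false_eq_true, if_false]
      have hdis' : ∀ q ∈ rest, q ∉ s ++ [p] := by
        intro q hq hqm
        rcases List.mem_append.mp hqm with h1 | h2
        · exact hdis q (by simp [hq]) h1
        · simp at h2; subst h2; exact hpn hq
      calc ((p :: rest).foldl PySem.Set.add s).length
          = (rest.foldl PySem.Set.add (s ++ [p])).length := by simp [List.foldl, hadd]
        _ = (s ++ [p]).length + rest.length := ih _ hnd' hdis'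
        _ = s.length + (p :: rest).length := by simp; omega

-- … and strictly fewer when it has a duplicate or hits s.
theorem pv_foldl_add_len_lt (xs : List (Int × Int)) :
    ∀ s : PySem.Set (Int × Int), ¬ (xs.Nodup ∧ ∀ p ∈ xs, p ∉ s) →
      (xs.foldl PySem.Set.add s).length < s.length + xs.length := by
  induction xs with
  | nil => intro s h; exact absurd ⟨List.nodup_nil, by simp⟩ h
  | cons p rest ih =>
      intro s h
      by_cases hps : p ∈ s
      · have hc : s.contains p = true := by simpa using hps
        have hadd : PySem.Set.add s p = s := by
          simp only [PySem.Set.add, hc, if_true]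
        calc ((p :: rest).foldl PySem.Set.add s).length
            = (rest.foldl PySem.Set.add s).length := by simp [List.foldl, hadd]
          _ ≤ s.length + rest.length := pv_foldl_add_len_le rest s
          _ < s.length + (p :: rest).length := by simp
      · have hc : s.contains p = false := by simpa using hps
        have hadd : PySem.Set.add s p = s ++ [p] := by
          simp only [PySem.Set.add, hc, Bool.false_eq_true, if_false]
        have hrest : ¬ (rest.Nodup ∧ ∀ q ∈ rest, q ∉ s ++ [p]) := by
          intro ⟨hnd', hdis'⟩
          apply h
          constructor
          · refine List.nodup_cons.mpr ⟨?_, hnd'⟩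
            intro hpr
            exact hdis' p hpr (by simp)
          · intro q hq
            rcases List.mem_cons.mp hq with h1 | h2
            · subst h1; exact hps
            · intro hqs
              exact hdis' q h2 (List.mem_append.mpr (Or.inl hqs))
        calc ((p :: rest).foldl PySem.Set.add s).length
            = (rest.foldl PySem.Set.add (s ++ [p])).length := by simp [List.foldl, hadd]
          _ < (s ++ [p]).length + rest.length := ih _ hrest
          _ = s.length + (p :: rest).length := by simp; omega

theorem pv_B_eq_nodup (x : List (Int × Int)) :
    (non_duplicates_alt x = true ↔ x.Nodup) := by
  unfold non_duplicates_alt PySem.Set.len PySem.Set.ofList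
  rw [beq_iff_eq, Int.natCast_inj]
  constructor
  · intro hlen
    by_contra hnd
    have hlt := pv_foldl_add_len_lt x PySem.Set.empty (by
      intro ⟨h1, _⟩; exact hnd h1)
    simp only [PySem.Set.empty, List.length_nil, Nat.zero_add] at hlt
    simp only [PySem.Set.empty] at hlen
    omega
  · intro hnd
    have := pv_foldl_add_len_eq x PySem.Set.empty hnd (by simp [PySem.Set.empty])
    simpa [PySem.Set.empty] using this

-- ===== VERDICT (by name: the statement is the Claim_ definition above) =====
theorem non_duplicates_spec : Claim_equal_non_duplicates := by
  intro x _
  unfold Spec_non_duplicates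
  rw [Bool.eq_iff_iff, pv_A_eq_nodup, pv_B_eq_nodup]
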